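-- pv_equiv track=rewrite | github.com/jstnlef/zebu-vm | src/vm/api/muapi2rustapi.py | to_rust_type
-- ===== SOURCE A (Python) =====
-- _primitive_types = {
--         "void"      : "c_void",
--         "char"      : "c_char",
--         "int"       : "c_int",
--         "long"      : "c_long",
--         "int8_t"    : "i8",
--         "uint8_t"   : "u8",
--         "int16_t"   : "i16",
--         "uint16_t"  : "u16",
--         "int32_t"   : "i32",
--         "uint32_t"  : "u32",
--         "int64_t"   : "i64",
--         "uint64_t"  : "u64",
--         "intptr_t"  : "isize",
--         "uintptr_t" : "usize",
--         "float"     : "f32",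
--         "double"    : "f64",
--         }
--
-- def type_is_explicit_ptr(ty):
--     return ty.endswith("*")
--
-- def to_rust_type(raw_type):
--     if type_is_explicit_ptr(raw_type):
--         base_type = raw_type[:-1]
--         base_rust_type = to_rust_type(base_type)
--         rust_type = "*mut " + base_rust_type
--     elif raw_type in _primitive_types:
--         rust_type = _primitive_types[raw_type]
--     else:
--         rust_type = "C" + raw_type
--
--     return rust_type
-- ===== SOURCE B (Python) =====
-- _primitive_types = {
--         "void"      : "c_void",
--         "char"      : "c_char",
--         "int"       : "c_int",
--         "long"      : "c_long",
--         "int8_t"    : "i8",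
--         "uint8_t"   : "u8",
--         "int16_t"   : "i16",
--         "uint16_t"  : "u16",
--         "int32_t"   : "i32",
--         "uint32_t"  : "u32",
--         "int64_t"   : "i64",
--         "uint64_t"  : "u64",
--         "intptr_t"  : "isize",
--         "uintptr_t" : "usize",
--         "float"     : "f32",
--         "double"    : "f64",
--         }
--
-- def to_rust_type(raw_type):
--     # Flat: strip trailing '*'s, map the base once, rebuild the prefix in one step.
--     base = raw_type.rstrip('*')
--     n = len(raw_type) - len(base)
--     return "*mut " * n + _primitive_types.get(base, "C" + base)
-- ===== Notes on version B (the rewrite author's own statement) =====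
-- stated objective: simpler
-- what changed: Replaces the one-recursive-call-per-'*' peeling with a flat computation: rstrip('*') finds the base in one pass, the star count is a length difference, and the '*mut ' prefix is rebuilt by string repetition instead of nested recursive appends.
import Mathlib
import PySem

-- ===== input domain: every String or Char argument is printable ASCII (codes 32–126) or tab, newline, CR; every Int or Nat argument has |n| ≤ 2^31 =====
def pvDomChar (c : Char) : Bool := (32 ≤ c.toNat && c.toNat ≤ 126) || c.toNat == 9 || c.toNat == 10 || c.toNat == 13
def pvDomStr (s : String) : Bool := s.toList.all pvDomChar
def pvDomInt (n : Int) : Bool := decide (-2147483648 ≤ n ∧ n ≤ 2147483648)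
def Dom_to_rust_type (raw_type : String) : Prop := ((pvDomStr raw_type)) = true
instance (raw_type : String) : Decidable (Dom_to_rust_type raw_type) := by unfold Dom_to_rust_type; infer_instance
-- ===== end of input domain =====

-- B replaces A's one-recursive-call-per-'*' peeling with a flat strip/count/rebuild computation (simpler decomposition, same values).

-- the module-level dict _primitive_types (identical in Source A and Source B)
def primTable : PySem.Dict String String :=
  PySem.Dict.ofList [("void", "c_void"), ("char", "c_char"), ("int", "c_int"), ("long", "c_long"),
   ("int8_t", "i8"), ("uint8_t", "u8"), ("int16_t", "i16"), ("uint16_t", "u16"),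
   ("int32_t", "i32"), ("uint32_t", "u32"), ("int64_t", "i64"), ("uint64_t", "u64"),
   ("intptr_t", "isize"), ("uintptr_t", "usize"), ("float", "f32"), ("double", "f64")]

-- ===== PORT A =====
-- termination helper for A's recursion: dropping the last char of a '*'-terminated string shrinks it
theorem pySliceNegOne_len_lt (s : String) (h : PySem.Str.endswith s "*" = true) :
    (PySem.Str.slice s none (some (-1))).toList.length < s.toList.length := by
  have hsuf : ("*" : String).toList <:+ s.toList := by
    have := PySem.Str.endswith_eq s "*"
    rw [this] at h
    exact (PySem.Chars.endswith_iff _ _).mp h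
  have hne : s.toList ≠ [] := by
    intro he; rw [he] at hsuf; simpa using hsuf.length_le
  rw [PySem.Str.slice_to_neg_one]
  have h0 : 0 < s.toList.length := List.length_pos_of_ne_nil hne
  rw [List.length_dropLast]; omega

-- type_is_explicit_ptr(ty) = ty.endswith("*"); recursion exactly as in Source A
def to_rust_type (raw_type : String) : String :=
  if h : PySem.Str.endswith raw_type "*" = true then
    -- base_type = raw_type[:-1]; rust_type = "*mut " + to_rust_type(base_type)
    "*mut " ++ to_rust_type (PySem.Str.slice raw_type none (some (-1)))
  else
    -- raw_type in _primitive_types → lookup, else "C" + raw_type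
    match PySem.Dict.get? primTable raw_type with
    | some r => r
    | none => "C" ++ raw_type
termination_by raw_type.toList.length
decreasing_by exact pySliceNegOne_len_lt raw_type h

-- ===== PORT B =====
-- "*mut " * n
def mutRep : Nat → String
  | 0 => ""
  | n + 1 => "*mut " ++ mutRep n

def to_rust_type_alt (raw_type : String) : String :=
  -- base = raw_type.rstrip('*'): drop the maximal run of trailing '*'s (hand port, exact:
  -- computed as dropWhile on the reversed character list); n = len(raw_type) - len(base)
  let rev := raw_type.toList.reverse
  let baseRev := rev.dropWhile (· = '*')
  let n := rev.length - baseRev.length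
  let base := String.ofList baseRev.reverse
  -- "*mut " * n + _primitive_types.get(base, "C" + base)
  mutRep n ++ PySem.Dict.getD primTable base ("C" ++ base)

-- ===== PRECONDITION & SPEC =====
def Spec_to_rust_type (raw_type : String) (out : String) : Prop := out = to_rust_type_alt raw_type
instance (raw_type : String) (out : String) : Decidable (Spec_to_rust_type raw_type out) := by unfold Spec_to_rust_type; infer_instance

-- ===== CLAIM (what is proved, stated in full; the proofs are below) =====
def Claim_equal_to_rust_type : Prop := ∀ (raw_type : String), Dom_to_rust_type raw_type → Spec_to_rust_type raw_type (to_rust_type raw_type)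

-- ===== LEMMAS AND PROOFS =====
-- main equivalence, by strong induction on the length of the string
theorem a_eq_alt : ∀ (n : Nat) (s : String), s.toList.length ≤ n →
    to_rust_type s = to_rust_type_alt s := by
  intro n
  induction n with
  | zero =>
    intro s hs
    have hnil : s.toList = [] := List.eq_nil_of_length_eq_zero (Nat.le_zero.mp hs)
    have hend : PySem.Str.endswith s "*" = false := by
      rw [PySem.Str.endswith_eq]
      rw [hnil]
      decide
    rw [to_rust_type, dif_neg (by simp only [hend]; decide)]
    unfold to_rust_type_alt
    simp only [hnil, List.reverse_nil, List.dropWhile_nil, List.length_nil, Nat.sub_self]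
    have hbase : String.ofList ([] : List Char) = s := by
      rw [← hnil]; exact String.ofList_toList
    rw [hbase, mutRep]
    cases hq : PySem.Dict.get? primTable s with
    | none => simp [PySem.Dict.getD, hq]
    | some r => simp [PySem.Dict.getD, hq]
  | succ n ih =>
    intro s hs
    cases hend : PySem.Str.endswith s "*" with
    | false =>
      rw [to_rust_type, dif_neg (by simp only [hend]; decide)]
      -- last char (if any) is not '*': dropWhile strips nothing
      have hnostar : s.toList.reverse.dropWhile (· = '*') = s.toList.reverse := by
        cases hr : s.toList.reverse with
        | nil => simp
        | cons c rest =>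
          have hcs : c ≠ '*' := by
            intro hc
            have hsuf : ['*'] <:+ s.toList := by
              refine ⟨rest.reverse, ?_⟩
              have := congrArg List.reverse hr
              simp at this
              rw [this, hc]
            have : PySem.Str.endswith s "*" = true := by
              rw [PySem.Str.endswith_eq]
              exact (PySem.Chars.endswith_iff _ _).mpr hsuf
            rw [this] at hend; exact absurd hend (by decide)
          simp [List.dropWhile, hcs]
      unfold to_rust_type_alt
      simp only [hnostar, Nat.sub_self, mutRep]
      have hbase : String.ofList s.toList.reverse.reverse = s := by
        simp
      rw [hbase]
      cases hq : PySem.Dict.get? primTable s with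
      | none => simp [PySem.Dict.getD, hq]
      | some r => simp [PySem.Dict.getD, hq]
    | true =>
      -- s = t ++ "*": one "*mut " layer on each side
      have hsuf : ['*'] <:+ s.toList := by
        have h1 := PySem.Str.endswith_eq s "*"
        rw [h1] at hend
        simpa using (PySem.Chars.endswith_iff _ _).mp hend
      obtain ⟨t, ht⟩ := hsuf
      set s' := PySem.Str.slice s none (some (-1)) with hs'
      have hts' : s'.toList = t := by
        rw [hs', PySem.Str.slice_to_neg_one, ← ht]
        simp
      rw [to_rust_type, dif_pos hend]
      have hlen : s'.toList.length ≤ n := by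
        have h1 : s.toList.length = t.length + 1 := by rw [← ht]; simp
        rw [hts']; omega
      rw [ih s' hlen]
      -- now show to_rust_type_alt s = "*mut " ++ to_rust_type_alt s'
      unfold to_rust_type_alt
      have hrev : s.toList.reverse = '*' :: t.reverse := by rw [← ht]; simp
      have hrev' : s'.toList.reverse = t.reverse := by rw [hts']
      simp only [hrev, hrev', List.dropWhile_cons, decide_true,
        List.length_cons, List.length_reverse, if_true]
      have hle : (t.reverse.dropWhile (· = '*')).length ≤ t.length := by
        have := List.length_dropWhile_le (· = '*') t.reverse
        simpa using this
      have hn1 : t.length + 1 - (t.reverse.dropWhile (· = '*')).length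
               = (t.length - (t.reverse.dropWhile (· = '*')).length) + 1 := by omega
      rw [hn1, mutRep, String.append_assoc]

-- ===== VERDICT (by name: the statement is the Claim_ definition above) =====
theorem to_rust_type_spec : Claim_equal_to_rust_type := by
  intro s _
  exact a_eq_alt s.toList.length s (le_refl _)
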